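-- pv_equiv track=rewrite | github.com/SaintHazzard/PythonHazzard | cursoBasicoPython/for2.py | rental_car_cost
-- ===== SOURCE A (Python) =====
-- def rental_car_cost(d):
--     cost = 0
--     for i in range(d):
--         cost += 40
--     if i > 5:
--         cost -= 50
--     if i >= 3:
--         cost -= 20
--     return cost
-- ===== SOURCE B (Python) =====
-- def rental_car_cost(d):
--     cost = 40 * d
--     if d >= 7:
--         cost -= 50
--     if d >= 4:
--         cost -= 20
--     return cost
-- ===== Notes on version B (the rewrite author's own statement) =====
-- stated objective: faster
-- what changed: Replaces the O(d) loop that adds 40 per day (and reads the leftover loop variable i = d-1 for the discounts) with a closed-form 40*d and direct threshold tests d >= 7 and d >= 4.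
import Mathlib
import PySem

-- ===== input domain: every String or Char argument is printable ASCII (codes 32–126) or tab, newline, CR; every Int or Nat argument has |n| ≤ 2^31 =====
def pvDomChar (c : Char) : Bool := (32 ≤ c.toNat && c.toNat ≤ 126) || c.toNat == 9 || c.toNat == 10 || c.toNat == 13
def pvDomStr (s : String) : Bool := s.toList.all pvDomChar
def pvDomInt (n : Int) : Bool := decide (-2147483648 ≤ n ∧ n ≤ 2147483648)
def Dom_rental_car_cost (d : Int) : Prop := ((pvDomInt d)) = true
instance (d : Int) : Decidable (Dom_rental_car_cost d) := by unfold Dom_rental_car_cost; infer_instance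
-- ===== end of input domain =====

-- B replaces A's per-day accumulation loop with closed-form arithmetic (O(1) instead of O(d)).

-- ===== PORT A =====
-- 'for i in range(d): cost += 40' ported as a fold over pyRange; after the loop Python's
-- i holds the last element of the range (unbound — NameError — when the range is empty,
-- which Pre_ excludes; the getD 0 default is unreachable under Pre_).
def rental_car_cost (d : Int) : Int :=
  let cost : Int := (PySem.List.pyRange 0 d 1).foldl (fun c _ => c + 40) 0
  let i : Int := ((PySem.List.pyRange 0 d 1).getLast?).getD 0
  let cost := if i > 5 then cost - 50 else cost
  let cost := if i ≥ 3 then cost - 20 else cost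
  cost

-- ===== PORT B =====
def rental_car_cost_alt (d : Int) : Int :=
  let cost : Int := 40 * d
  let cost := if d ≥ 7 then cost - 50 else cost
  let cost := if d ≥ 4 then cost - 20 else cost
  cost

-- ===== PRECONDITION & SPEC =====
-- Pre_ excludes d ≤ 0, where A raises NameError (the loop body never runs so i is unbound).
def Pre_rental_car_cost (d : Int) : Prop := 1 ≤ d
instance (d : Int) : Decidable (Pre_rental_car_cost d) := by unfold Pre_rental_car_cost; infer_instance
def pvWitness_rental_car_cost : Int := (5)

def Spec_rental_car_cost (d : Int) (out : Int) : Prop := out = rental_car_cost_alt d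
instance (d : Int) (out : Int) : Decidable (Spec_rental_car_cost d out) := by unfold Spec_rental_car_cost; infer_instance

-- ===== CLAIM (what is proved, stated in full; the proofs are below) =====
def Claim_equal_rental_car_cost : Prop := ∀ (d : Int), Dom_rental_car_cost d → Pre_rental_car_cost d → Spec_rental_car_cost d (rental_car_cost d)

-- ===== LEMMAS AND PROOFS =====
theorem pv_foldl_forty (d : Int) :
    (PySem.List.pyRange 0 d 1).foldl (fun c _ => c + 40) 0 = 40 * ((PySem.List.pyRange 0 d 1).length : Int) := by
  rw [PySem.List.foldl_add (g := fun _ => (40 : Int))]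
  simp [List.map_const', mul_comm]

theorem pv_last_range (d : Int) (hd : 1 ≤ d) :
    ((PySem.List.pyRange 0 d 1).getLast?).getD 0 = d - 1 := by
  have h : PySem.List.pyRange 0 d 1 = PySem.List.pyRange 0 (d-1) 1 ++ [d-1] := by
    have := PySem.List.pyRange_one_succ_right (a := 0) (b := d - 1) (by omega)
    simpa using this
  rw [h]; simp

-- ===== VERDICT (by name: the statement is the Claim_ definition above) =====
theorem rental_car_cost_spec : Claim_equal_rental_car_cost := by
  intro d _ hpre
  unfold Pre_rental_car_cost at hpre
  unfold Spec_rental_car_cost rental_car_cost rental_car_cost_alt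
  rw [pv_foldl_forty, pv_last_range d hpre, PySem.List.length_pyRange_one]
  have h0 : ((d - 0).toNat : Int) = d := by omega
  rw [h0]
  rcases lt_or_ge d 4 with h | h
  · simp [show ¬ (d - 1 > 5) by omega, show ¬ (d - 1 ≥ 3) by omega, show ¬ (d ≥ 7) by omega, show ¬ (d ≥ 4) by omega]
  · rcases lt_or_ge d 7 with h7 | h7
    · simp [show ¬ (d - 1 > 5) by omega, show (d - 1 ≥ 3) by omega, show ¬ (d ≥ 7) by omega, show (d ≥ 4) by omega]
    · simp [show (d - 1 > 5) by omega, show (d - 1 ≥ 3) by omega, show (d ≥ 7) by omega, show (d ≥ 4) by omega]
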